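-- pv_equiv track=rewrite | github.com/ByeonDoHyeon06/python-what-is-vibe-coding | app/application/use_cases/refresh_server_status.py | _parse_ip_from_config
-- ===== SOURCE A (Python) =====
-- def _parse_ip_from_config(config: dict | None) -> str | None:
--     if not config:
--         return None
--     ipconfig = config.get("ipconfig0")
--     if isinstance(ipconfig, str):
--         parts = ipconfig.split(",")
--         for part in parts:
--             if part.strip().startswith("ip="):
--                 ip_val = part.split("=", 1)[1]
--                 if "/" in ip_val:
--                     return ip_val.split("/", 1)[0]
--                 return ip_val
--     return None
-- ===== SOURCE B (Python) =====
-- def _parse_ip_from_config(config: dict | None) -> str | None: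
--     if not config:
--         return None
--     ipconfig = config.get("ipconfig0")
--     if not isinstance(ipconfig, str):
--         return None
--     values = {}
--     for part in ipconfig.split(","):
--         if "=" in part:
--             key, val = part.split("=", 1)
--             values.setdefault(key.lstrip(), val)
--     ip_val = values.get("ip")
--     if ip_val is None:
--         return None
--     return ip_val.split("/", 1)[0] if "/" in ip_val else ip_val
-- ===== Notes on version B (the rewrite author's own statement) =====
-- stated objective: idiomatic
-- what changed: A's linear prefix-scan for the first part whose stripped form starts with 'ip=' is replaced by building a key->value dict of all '='-pairs in one pass (setdefault, first occurrence wins) followed by a single lookup of the 'ip' key.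
import Mathlib
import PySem

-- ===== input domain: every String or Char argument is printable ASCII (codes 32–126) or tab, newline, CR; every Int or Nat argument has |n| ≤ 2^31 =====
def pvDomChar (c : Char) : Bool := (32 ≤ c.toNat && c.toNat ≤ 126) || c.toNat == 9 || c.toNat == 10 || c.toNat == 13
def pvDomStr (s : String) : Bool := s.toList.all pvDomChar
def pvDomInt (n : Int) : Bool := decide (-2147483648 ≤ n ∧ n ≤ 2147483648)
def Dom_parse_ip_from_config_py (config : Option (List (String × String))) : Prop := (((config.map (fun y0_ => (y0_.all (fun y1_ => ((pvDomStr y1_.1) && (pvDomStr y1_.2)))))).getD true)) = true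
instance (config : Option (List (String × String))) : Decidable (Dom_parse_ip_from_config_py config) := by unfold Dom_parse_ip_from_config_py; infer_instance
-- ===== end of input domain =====

-- B replaces A's prefix-scan of the comma-separated parts (first part whose stripped form starts
-- with "ip=") by building a key→value index of all '='-pairs once (setdefault: first occurrence
-- wins) and looking up the "ip" key; objective: idiomatic, same cost. Return values proved equal.

-- ===== PORT A =====
-- the 'for part in parts' loop of A: first part whose stripped form starts with "ip=" wins
def pvALoop (parts : List String) : Option String :=
  match parts with
  | [] => none
  | part :: rest =>
    if PySem.Str.startswith (PySem.Str.strip part) "ip=" then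
      -- part.split("=", 1)[1]
      match PySem.List.pyGet? ((PySem.Str.splitMax? part "=" 1).getD []) 1 with
      | some ip_val =>
        if PySem.Str.isIn "/" ip_val then
          -- ip_val.split("/", 1)[0]: split always returns ≥ 1 piece, so [0] is the head
          some (((PySem.Str.splitMax? ip_val "/" 1).getD []).headD "")
        else some ip_val
      | none => none   -- unreachable: the guard guarantees '=' occurs in part, so [1] exists
    else pvALoop rest

def parse_ip_from_config_py (config : Option (List (String × String))) : Option String :=
  match config with
  | none => none                                     -- 'if not config' (None)
  | some cfg =>
    if cfg.isEmpty then none                         -- 'if not config' (empty dict)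
    else
      match (PySem.Dict.mk cfg).get? "ipconfig0" with
      | some ipconfig => pvALoop ((PySem.Str.split? ipconfig ",").getD [])
      | none => none                                 -- missing key: isinstance(None, str) is False

-- ===== PORT B =====
-- one iteration of B's index-building loop: record key.lstrip() → val for the first occurrence
def pvBStep (values : PySem.Dict String String) (part : String) : PySem.Dict String String :=
  if PySem.Str.isIn "=" part then
    -- key, val = part.split("=", 1): exactly two pieces since '=' occurs in part
    let pieces := (PySem.Str.splitMax? part "=" 1).getD []
    values.setdefault (PySem.Str.lstrip (pieces.headD "")) (pieces.getD 1 "")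
  else values

def parse_ip_from_config_py_alt (config : Option (List (String × String))) : Option String :=
  match config with
  | none => none
  | some cfg =>
    if cfg.isEmpty then none
    else
      match (PySem.Dict.mk cfg).get? "ipconfig0" with
      | some ipconfig =>
        let values := ((PySem.Str.split? ipconfig ",").getD []).foldl pvBStep PySem.Dict.empty
        match values.get? "ip" with
        | some ip_val =>
          if PySem.Str.isIn "/" ip_val then
            some (((PySem.Str.splitMax? ip_val "/" 1).getD []).headD "")
          else some ip_val
        | none => none
      | none => none

-- ===== PRECONDITION & SPEC =====
def Spec_parse_ip_from_config_py (config : Option (List (String × String))) (out : Option String) : Prop := out = parse_ip_from_config_py_alt config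
instance (config : Option (List (String × String))) (out : Option String) : Decidable (Spec_parse_ip_from_config_py config out) := by unfold Spec_parse_ip_from_config_py; infer_instance

-- ===== CLAIM (what is proved, stated in full; the proofs are below) =====
def Claim_equal_parse_ip_from_config_py : Prop := ∀ (config : Option (List (String × String))), Dom_parse_ip_from_config_py config → Spec_parse_ip_from_config_py config (parse_ip_from_config_py config)

-- ===== LEMMAS AND PROOFS =====

-- what B does after the index lookup, as a function of the lookup's result
def pvPost : Option String → Option String
  | some ip_val =>
    if PySem.Str.isIn "/" ip_val then
      some (((PySem.Str.splitMax? ip_val "/" 1).getD []).headD "")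
    else some ip_val
  | none => none

-- splitOnMax.go with maxsplit 1 and separator ['=']: the separator does not occur in l
theorem pvGoNotMem (l : List Char) : ∀ (fuel : ℕ) (cur : List Char) (acc : List (List Char)),
    l.length < fuel → '=' ∉ l →
    PySem.Chars.splitOnMax.go ['='] fuel 1 l cur acc = ((cur.reverse ++ l) :: acc).reverse := by
  induction l with
  | nil =>
    intro fuel cur acc _ _
    cases fuel <;> rw [PySem.Chars.splitOnMax.go.eq_def] <;> simp
  | cons c rest ih =>
    intro fuel cur acc hf hm
    match fuel, hf with
    | fuel + 1, hf =>
      rw [PySem.Chars.splitOnMax.go.eq_def]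
      have hc : ('=' == c) = false := by
        simp only [beq_eq_false_iff_ne]; intro h; exact hm (h ▸ List.mem_cons_self ..)
      simp only [List.isPrefixOf, hc, Bool.false_and, if_neg (by omega : ¬ (1 : ℕ) = 0)]
      rw [if_neg (by simp)]
      rw [ih fuel (c :: cur) acc (by simpa using hf) (fun h => hm (List.mem_cons_of_mem _ h))]
      simp

-- splitOnMax.go with maxsplit 1 and separator ['=']: the separator occurs in l
theorem pvGoMem (l : List Char) : ∀ (fuel : ℕ) (cur : List Char) (acc : List (List Char)),
    l.length < fuel → '=' ∈ l →
    PySem.Chars.splitOnMax.go ['='] fuel 1 l cur acc =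
      ((l.dropWhile (· ≠ '=')).tail :: (cur.reverse ++ l.takeWhile (· ≠ '=')) :: acc).reverse := by
  induction l with
  | nil => intro _ _ _ _ hm; simp at hm
  | cons c rest ih =>
    intro fuel cur acc hf hm
    match fuel, hf with
    | fuel + 1, hf =>
      rw [PySem.Chars.splitOnMax.go.eq_def]
      by_cases hc : c = '='
      · subst hc
        simp only [List.isPrefixOf, beq_self_eq_true, Bool.true_and,
          if_neg (by omega : ¬ (1 : ℕ) = 0), List.isPrefixOf_nil_left, if_true]
        have : PySem.Chars.splitOnMax.go ['='] fuel (1 - 1) (List.drop ['='].length ('=' :: rest)) [] (cur.reverse :: acc)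
            = (rest :: cur.reverse :: acc).reverse := by
          match fuel, hf with
          | fuel' + 1, _ =>
            cases rest with
            | nil => rw [PySem.Chars.splitOnMax.go.eq_def]; simp
            | cons d t => rw [PySem.Chars.splitOnMax.go.eq_def]; simp
        rw [this]
        simp [List.takeWhile, List.dropWhile]
      · have hbc : ('=' == c) = false := by
          simp only [beq_eq_false_iff_ne]; exact fun h => hc h.symm
        simp only [List.isPrefixOf, hbc, Bool.false_and, if_neg (by omega : ¬ (1 : ℕ) = 0)]
        rw [if_neg (by simp)]
        have hm' : '=' ∈ rest := by cases hm with | head => exact absurd rfl hc | tail _ h => exact h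
        rw [ih fuel (c :: cur) acc (by simpa using hf) hm']
        simp [List.takeWhile, List.dropWhile, hc]

-- s.split('=', 1) at the char level: one cut at the first '=', or no cut at all
theorem pvSplitChars (cs : List Char) :
    PySem.Chars.splitMax? cs ['='] 1 =
      some (if '=' ∈ cs then [cs.takeWhile (· ≠ '='), (cs.dropWhile (· ≠ '=')).tail] else [cs]) := by
  simp only [PySem.Chars.splitMax?]
  rw [if_neg (by decide), PySem.Chars.splitOnMax.eq_1, if_neg (by omega)]
  by_cases h : '=' ∈ cs
  · rw [show (1:ℤ).toNat = 1 from rfl, pvGoMem cs (cs.length + 1) [] [] (by omega) h]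
    simp [h]
  · rw [show (1:ℤ).toNat = 1 from rfl, pvGoNotMem cs (cs.length + 1) [] [] (by omega) h]
    simp [h]

-- part.split("=", 1) has exactly the two pieces key/value when '=' occurs in part
theorem pvPiecesMem (part : String) (h : '=' ∈ part.toList) :
    ∃ k v : String, (PySem.Str.splitMax? part "=" 1).getD [] = [k, v] ∧
      k.toList = part.toList.takeWhile (· ≠ '=') ∧
      v.toList = (part.toList.dropWhile (· ≠ '=')).tail := by
  have hc := PySem.Str.splitMax?_map part "=" 1
  rw [show ("=" : String).toList = ['='] from rfl, pvSplitChars, if_pos h] at hc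
  match he : PySem.Str.splitMax? part "=" 1 with
  | none => rw [he] at hc; simp at hc
  | some ps =>
    rw [he] at hc
    simp only [Option.map_some, Option.some.injEq] at hc
    cases ps with
    | nil => simp at hc
    | cons k rest =>
      cases rest with
      | nil => simp at hc
      | cons v rest2 =>
        cases rest2 with
        | nil =>
          simp only [List.map_cons, List.map_nil, List.cons.injEq, and_true] at hc
          exact ⟨k, v, rfl, hc.1, hc.2⟩
        | cons w ws => simp at hc

-- strip s is a sublist of s
theorem pvStripSublist (s : List Char) : (PySem.Chars.strip s).Sublist s := by
  have h1 : (PySem.Chars.lstrip s).Sublist s := List.dropWhile_sublist _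
  have h2 : (PySem.Chars.rstrip (PySem.Chars.lstrip s)).Sublist (PySem.Chars.lstrip s) := by
    have := (List.dropWhile_sublist (l := (PySem.Chars.lstrip s).reverse) (p := PySem.Chars.isspace)).reverse
    simpa [PySem.Chars.rstrip] using this
  exact h2.trans h1

-- decomposition of cs at its first '='
theorem pvDecomp (cs : List Char) (h : '=' ∈ cs) :
    cs = cs.takeWhile (· ≠ '=') ++ '=' :: (cs.dropWhile (· ≠ '=')).tail := by
  induction cs with
  | nil => simp at h
  | cons c t ih =>
    by_cases hc : c = '='
    · subst hc; simp [List.takeWhile, List.dropWhile]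
    · have h' : '=' ∈ t := by cases h with | head => exact absurd rfl hc | tail _ hh => exact hh
      simp only [List.takeWhile, List.dropWhile, show (decide (c ≠ '=')) = true by simp [hc]]
      simpa using ih h'

theorem pvLstripAppend (K V : List Char) :
    PySem.Chars.lstrip (K ++ '=' :: V) = PySem.Chars.lstrip K ++ '=' :: V := by
  simp only [PySem.Chars.lstrip, List.dropWhile_append]
  split
  · next h =>
    simp only [List.isEmpty_iff] at h
    rw [h, List.dropWhile]
    simp [show PySem.Chars.isspace '=' = false from rfl]
  · rfl

theorem pvRstripAppend (L V : List Char) :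
    PySem.Chars.rstrip ((L ++ ['=']) ++ V) = L ++ '=' :: PySem.Chars.rstrip V := by
  have h1 : ((L ++ ['=']) ++ V).reverse = V.reverse ++ '=' :: L.reverse := by simp
  simp only [PySem.Chars.rstrip, h1, List.dropWhile_append]
  by_cases he : (List.dropWhile PySem.Chars.isspace V.reverse).isEmpty = true
  · simp only [he, if_true]
    rw [List.isEmpty_iff] at he
    rw [he, List.dropWhile_cons]
    simp [show PySem.Chars.isspace '=' = false from rfl]
  · simp only [he, if_false]
    simp [show PySem.Chars.isspace '=' = false from rfl]

-- core equivalence of the two guards, at the char level: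
-- part.strip().startswith("ip=")  ↔  '=' occurs in part and the key before it lstrips to "ip"
theorem pvCondChars (cs : List Char) :
    PySem.Chars.startswith (PySem.Chars.strip cs) ['i', 'p', '='] = true ↔
      ('=' ∈ cs ∧ PySem.Chars.lstrip (cs.takeWhile (· ≠ '=')) = ['i', 'p']) := by
  rw [PySem.Chars.startswith_iff]
  by_cases h : '=' ∈ cs
  · set K := cs.takeWhile (· ≠ '=') with hK
    set V := (cs.dropWhile (· ≠ '=')).tail with hV
    set L := PySem.Chars.lstrip K with hL
    have hKfree : '=' ∉ K := fun hmem => by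
      have := List.mem_takeWhile_imp hmem
      simp at this
    have hLfree : '=' ∉ L := fun hmem => hKfree ((List.dropWhile_sublist _).subset hmem)
    have hstrip : PySem.Chars.strip cs = L ++ '=' :: PySem.Chars.rstrip V := by
      have hdec := pvDecomp cs h
      unfold PySem.Chars.strip
      rw [← hK, ← hV] at hdec
      rw [hdec, pvLstripAppend, ← hL]
      rw [show L ++ '=' :: V = (L ++ ['=']) ++ V by simp]
      exact pvRstripAppend L V
    rw [hstrip]
    constructor
    · rintro ⟨t, ht⟩
      refine ⟨h, ?_⟩
      match L, hLfree, ht with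
      | [], _, ht => simp at ht
      | [a], _, ht => simp at ht
      | [a, b], _, ht =>
        simp only [List.cons_append, List.nil_append, List.cons.injEq] at ht
        rw [ht.1, ht.2.1]
      | a :: b :: c :: L', hLfree, ht =>
        simp only [List.cons_append, List.cons.injEq] at ht
        exact absurd (by rw [← ht.2.2.1]; simp : '=' ∈ a :: b :: c :: L') hLfree
    · rintro ⟨-, hLip⟩
      rw [hLip]
      exact ⟨PySem.Chars.rstrip V, rfl⟩
  · constructor
    · rintro ⟨t, ht⟩
      exfalso
      apply h
      apply (pvStripSublist cs).subset
      rw [← ht]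
      simp
    · rintro ⟨hh, -⟩; exact absurd hh h

-- '=' in part, as a membership fact
theorem pvIn (part : String) : PySem.Str.isIn "=" part = true ↔ '=' ∈ part.toList := by
  rw [PySem.Str.isIn_eq, PySem.Chars.isIn_iff_infix,
    show ("=" : String).toList = ['='] from rfl]
  exact List.singleton_infix_iff ..

-- A's guard on a part holds iff B records that part under the key "ip"
theorem pvCond (part : String) :
    PySem.Str.startswith (PySem.Str.strip part) "ip=" = true ↔
      (PySem.Str.isIn "=" part = true ∧
        PySem.Str.lstrip (((PySem.Str.splitMax? part "=" 1).getD []).headD "") = "ip") := by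
  rw [PySem.Str.startswith_eq, PySem.Str.toList_strip,
    show ("ip=" : String).toList = ['i', 'p', '='] from rfl, pvCondChars]
  by_cases hmem : '=' ∈ part.toList
  · obtain ⟨k, v, hpieces, hk, hv⟩ := pvPiecesMem part hmem
    rw [hpieces]
    simp only [List.headD_cons]
    have hls : PySem.Str.lstrip k = "ip" ↔
        PySem.Chars.lstrip (part.toList.takeWhile (· ≠ '=')) = ['i', 'p'] := by
      rw [← hk, ← PySem.Str.toList_lstrip]
      constructor
      · intro h; rw [h]; rfl
      · intro h; exact String.toList_inj.mp (by rw [h]; rfl)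
    constructor
    · rintro ⟨h1, h2⟩; exact ⟨(pvIn part).mpr h1, hls.mpr h2⟩
    · rintro ⟨h1, h2⟩; exact ⟨(pvIn part).mp h1, hls.mp h2⟩
  · constructor
    · rintro ⟨h1, -⟩; exact absurd h1 hmem
    · rintro ⟨h1, -⟩; exact absurd ((pvIn part).mp h1) hmem

-- once "ip" is bound in the index, later parts cannot change it (setdefault)
theorem pvPersist (parts : List String) : ∀ (d : PySem.Dict String String) (w : String),
    d.get? "ip" = some w → (parts.foldl pvBStep d).get? "ip" = some w := by
  induction parts with
  | nil => intro d w h; simpa using h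
  | cons part rest ih =>
    intro d w h
    rw [List.foldl_cons]
    apply ih
    simp only [pvBStep]
    split
    · by_cases hk : ("ip" : String) =
        PySem.Str.lstrip ((((PySem.Str.splitMax? part "=" 1).getD []).headD ""))
      · rw [← hk, PySem.Dict.get?_setdefault_self, h]; rfl
      · rw [PySem.Dict.get?_setdefault_of_ne _ _ hk]; exact h
    · exact h

-- main correspondence: A's scan over the parts = B's index build followed by the "ip" lookup
theorem pvMain (parts : List String) : ∀ (d : PySem.Dict String String),
    d.get? "ip" = none → pvALoop parts = pvPost ((parts.foldl pvBStep d).get? "ip") := by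
  induction parts with
  | nil => intro d hd; rw [List.foldl_nil, hd]; rfl
  | cons part rest ih =>
    intro d hd
    by_cases hc : PySem.Str.startswith (PySem.Str.strip part) "ip=" = true
    · obtain ⟨hin, hkey⟩ := (pvCond part).mp hc
      obtain ⟨k, v, hpieces, hk, hv⟩ := pvPiecesMem part ((pvIn part).mp hin)
      have hkeyk : PySem.Str.lstrip k = "ip" := by
        rw [hpieces] at hkey
        simpa using hkey
      have hstep : pvBStep d part = d.setdefault "ip" v := by
        unfold pvBStep
        rw [if_pos hin, hpieces]
        simp [hkeyk]
      have hget : (List.foldl pvBStep d (part :: rest)).get? "ip" = some v := by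
        rw [List.foldl_cons, hstep]
        exact pvPersist rest _ v (by rw [PySem.Dict.get?_setdefault_self, hd]; rfl)
      rw [hget]
      show (if PySem.Str.startswith (PySem.Str.strip part) "ip=" = true then _ else pvALoop rest) = _
      rw [if_pos hc, hpieces]
      have hg : PySem.List.pyGet? [k, v] (1 : ℤ) = some v := by
        simp [PySem.List.pyGet?, PySem.List.pyIdx?]
      rw [hg]
      rfl
    · have hstep : (pvBStep d part).get? "ip" = none := by
        unfold pvBStep
        split
        · next hin =>
          have hne : ("ip" : String) ≠
              PySem.Str.lstrip (((PySem.Str.splitMax? part "=" 1).getD []).headD "") :=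
            fun he => hc ((pvCond part).mpr ⟨hin, he.symm⟩)
          rw [PySem.Dict.get?_setdefault_of_ne _ _ hne]; exact hd
        · exact hd
      show (if PySem.Str.startswith (PySem.Str.strip part) "ip=" = true then _ else pvALoop rest) = _
      rw [if_neg hc, List.foldl_cons]
      exact ih _ hstep

-- ===== VERDICT (by name: the statement is the Claim_ definition above) =====
theorem parse_ip_from_config_py_spec : Claim_equal_parse_ip_from_config_py := by
  intro config _
  unfold Spec_parse_ip_from_config_py parse_ip_from_config_py parse_ip_from_config_py_alt
  match config with
  | none => rfl
  | some cfg =>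
    by_cases hE : cfg.isEmpty
    · simp [hE]
    · simp only [hE, Bool.false_eq_true, if_false]
      match (PySem.Dict.mk cfg).get? "ipconfig0" with
      | none => rfl
      | some ipconfig =>
        show pvALoop ((PySem.Str.split? ipconfig ",").getD []) =
          match (((PySem.Str.split? ipconfig ",").getD []).foldl pvBStep PySem.Dict.empty).get? "ip" with
          | some ip_val =>
            if PySem.Str.isIn "/" ip_val then
              some (((PySem.Str.splitMax? ip_val "/" 1).getD []).headD "")
            else some ip_val
          | none => none
        rw [pvMain ((PySem.Str.split? ipconfig ",").getD []) PySem.Dict.empty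
          (PySem.Dict.get?_empty _)]
        cases (((PySem.Str.split? ipconfig ",").getD []).foldl pvBStep PySem.Dict.empty).get? "ip" <;> rfl
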